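-- pv_equiv track=rewrite | github.com/HaydenInEdinburgh/LintCode | 956_data_segmentation.py | dataSegmentation
-- ===== SOURCE A (Python) =====
-- def dataSegmentation(string):
--     # Write your code here
--     if not string:
--         return []
--
--     res = []
--     word = ''
--
--     for char in string:
--         if char.isalnum():
--             word += char
--         else:
--             if word:
--                 res.append(word)
--                 word = ''
--             if char != ' ':
--                 res.append(char)
--
--     if word:
--         res.append(word)
--
--     return res
-- ===== SOURCE B (Python) =====
-- def dataSegmentation(string):
--     # Run-scanning with two pointers: emit each maximal alnum run as one word,
--     # and each non-space non-alnum character as its own token.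
--     res = []
--     i, n = 0, len(string)
--     while i < n:
--         if string[i].isalnum():
--             j = i
--             while j < n and string[j].isalnum():
--                 j += 1
--             res.append(string[i:j])
--             i = j
--         else:
--             if string[i] != ' ':
--                 res.append(string[i])
--             i += 1
--     return res
-- ===== Notes on version B (the rewrite author's own statement) =====
-- stated objective: alternative
-- what changed: Replaces the char-by-char buffer-and-flush accumulation with a two-pointer run scanner that slices out each maximal alphanumeric run as a word directly.
import Mathlib
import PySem

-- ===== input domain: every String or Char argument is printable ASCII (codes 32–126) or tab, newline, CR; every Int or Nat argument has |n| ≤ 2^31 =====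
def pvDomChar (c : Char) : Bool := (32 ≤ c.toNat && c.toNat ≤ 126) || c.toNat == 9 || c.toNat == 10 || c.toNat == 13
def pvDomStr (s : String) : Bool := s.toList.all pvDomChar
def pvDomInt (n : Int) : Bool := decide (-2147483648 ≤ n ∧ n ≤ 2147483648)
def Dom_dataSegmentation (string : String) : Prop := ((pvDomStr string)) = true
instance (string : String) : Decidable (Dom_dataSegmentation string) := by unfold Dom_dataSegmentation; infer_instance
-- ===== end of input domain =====

-- B replaces A's buffer-and-flush char loop with a two-pointer run scanner; same return value.

-- char.isalnum() on the printable-ASCII domain: letter or digit (exact there)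
def pvAlnum (c : Char) : Bool := c.isAlpha || c.isDigit

-- ===== PORT A =====
-- loop state: (res, word); word accumulated as a list of chars
def dataSegmentationStep (st : List String × List Char) (c : Char) : List String × List Char :=
  if pvAlnum c then (st.1, st.2 ++ [c])
  else
    let res1 := if st.2 ≠ [] then st.1 ++ [String.ofList st.2] else st.1
    let res2 := if c ≠ ' ' then res1 ++ [String.ofList [c]] else res1
    (res2, [])

def dataSegmentation (string : String) : List String :=
  if string = "" then []
  else
    let st := string.toList.foldl dataSegmentationStep ([], [])
    if st.2 ≠ [] then st.1 ++ [String.ofList st.2] else st.1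

-- ===== PORT B =====
-- two-pointer run scan: the inner while that advances j is takeWhile/dropWhile on the run
def dataSegmentationGo : List Char → List String
  | [] => []
  | c :: cs =>
    if pvAlnum c then
      String.ofList ((c :: cs).takeWhile pvAlnum) :: dataSegmentationGo ((c :: cs).dropWhile pvAlnum)
    else if c = ' ' then dataSegmentationGo cs
    else String.ofList [c] :: dataSegmentationGo cs
termination_by l => l.length
decreasing_by
  · rename_i h
    simp only [List.dropWhile_cons, h, if_true, List.length_cons]
    exact Nat.lt_succ_of_le (List.length_dropWhile_le pvAlnum cs)
  · simp
  · simp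

def dataSegmentation_alt (string : String) : List String :=
  dataSegmentationGo string.toList

-- ===== PRECONDITION & SPEC =====
def Spec_dataSegmentation (string : String) (out : List String) : Prop := out = dataSegmentation_alt string
instance (string : String) (out : List String) : Decidable (Spec_dataSegmentation string out) := by unfold Spec_dataSegmentation; infer_instance

-- ===== CLAIM (what is proved, stated in full; the proofs are below) =====
def Claim_equal_dataSegmentation : Prop := ∀ (string : String), Dom_dataSegmentation string → Spec_dataSegmentation string (dataSegmentation string)

-- ===== LEMMAS AND PROOFS =====

theorem go_nil : dataSegmentationGo [] = [] := by simp [dataSegmentationGo]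

theorem go_cons_alnum (c : Char) (cs : List Char) (h : pvAlnum c = true) :
    dataSegmentationGo (c :: cs) =
      String.ofList (c :: cs.takeWhile pvAlnum) :: dataSegmentationGo (cs.dropWhile pvAlnum) := by
  rw [dataSegmentationGo]
  simp [h]

theorem go_cons_not (c : Char) (cs : List Char) (h : ¬ pvAlnum c = true) :
    dataSegmentationGo (c :: cs) =
      (if c = ' ' then dataSegmentationGo cs else String.ofList [c] :: dataSegmentationGo cs) := by
  rw [dataSegmentationGo]
  simp [h]

-- a nonempty all-alnum pending word prefixes the next run
theorem go_word_prefix (w cs : List Char) (hw : ∀ c ∈ w, pvAlnum c = true) (hne : w ≠ []) :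
    dataSegmentationGo (w ++ cs) =
      String.ofList (w ++ cs.takeWhile pvAlnum) :: dataSegmentationGo (cs.dropWhile pvAlnum) := by
  induction w with
  | nil => exact absurd rfl hne
  | cons a w ih =>
    have ha : pvAlnum a = true := hw a (by simp)
    by_cases hwnil : w = []
    · subst hwnil
      simpa using go_cons_alnum a cs ha
    · rw [List.cons_append, go_cons_alnum a (w ++ cs) ha]
      have h1 : (w ++ cs).takeWhile pvAlnum = w ++ cs.takeWhile pvAlnum := by
        apply List.takeWhile_append_of_pos
        intro x hx; exact hw x (by simp [hx])
      have h2 : (w ++ cs).dropWhile pvAlnum = cs.dropWhile pvAlnum := by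
        apply List.dropWhile_append_of_pos
        intro x hx; exact hw x (by simp [hx])
      rw [h1, h2]
      simp

-- main invariant: finishing A's fold from (res, w) equals res ++ B's scan of (w ++ cs)
theorem fold_invariant (cs : List Char) :
    ∀ (res : List String) (w : List Char), (∀ c ∈ w, pvAlnum c = true) →
    (let st := cs.foldl dataSegmentationStep (res, w);
     if st.2 ≠ [] then st.1 ++ [String.ofList st.2] else st.1) = res ++ dataSegmentationGo (w ++ cs) := by
  induction cs with
  | nil =>
    intro res w hw
    by_cases hne : w = []
    · subst hne; simp [go_nil]
    · have h := go_word_prefix w [] hw hne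
      simp only [List.append_nil, List.takeWhile_nil, List.dropWhile_nil, go_nil] at h
      simp only [List.foldl_nil, List.append_nil, hne, ne_eq, not_false_eq_true, if_true, h]
  | cons c cs ih =>
    intro res w hw
    by_cases hc : pvAlnum c = true
    · have hw' : ∀ x ∈ w ++ [c], pvAlnum x = true := by
        intro x hx
        rcases List.mem_append.mp hx with h | h
        · exact hw x h
        · simp at h; subst h; exact hc
      have h := ih res (w ++ [c]) hw'
      rw [List.append_assoc] at h
      have hstep : dataSegmentationStep (res, w) c = (res, w ++ [c]) := by
        simp [dataSegmentationStep, hc]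
      simp only [List.foldl_cons, hstep]
      simpa using h
    · have hstep : dataSegmentationStep (res, w) c =
          (res ++ ((if w ≠ [] then [String.ofList w] else []) ++
                   (if c ≠ ' ' then [String.ofList [c]] else [])), []) := by
        simp only [dataSegmentationStep, hc]
        split_ifs <;> simp_all
      have key : dataSegmentationGo (w ++ c :: cs) =
          (if w ≠ [] then [String.ofList w] else []) ++
          ((if c ≠ ' ' then [String.ofList [c]] else []) ++ dataSegmentationGo cs) := by
        by_cases hne : w = []
        · subst hne
          rw [List.nil_append, go_cons_not c cs hc]
          by_cases hsp : c = ' ' <;> simp [hsp]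
        · have hrun : (c :: cs).takeWhile pvAlnum = [] := by simp [hc]
          have hdrop : (c :: cs).dropWhile pvAlnum = c :: cs := by simp [hc]
          rw [go_word_prefix w (c :: cs) hw hne, hrun, hdrop, go_cons_not c cs hc]
          by_cases hsp : c = ' ' <;> simp [hsp, hne]
      have h := ih (res ++ ((if w ≠ [] then [String.ofList w] else []) ++
                            (if c ≠ ' ' then [String.ofList [c]] else []))) []
                   (by intro x hx; simp at hx)
      simp only [List.nil_append] at h
      simp only [List.foldl_cons, hstep, h, key, List.append_assoc]

-- ===== VERDICT (by name: the statement is the Claim_ definition above) =====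
theorem dataSegmentation_spec : Claim_equal_dataSegmentation := by
  intro s _
  unfold Spec_dataSegmentation dataSegmentation dataSegmentation_alt
  by_cases hs : s = ""
  · subst hs; simp [go_nil]
  · rw [if_neg hs]
    have h := fold_invariant s.toList [] [] (by intro x hx; simp at hx)
    simpa using h
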